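-- pv_equiv track=rewrite | github.com/bnbbbb/Algotithm | 프로그래머스/unrated/135808. 과일 장수/과일 장수.py | solution
-- ===== SOURCE A (Python) =====
-- def solution(k, m, score):
--     answer = 0
--     score.sort(reverse = True)
--     a = []
--     b = []
--     for i in score:
--         a.append(i)
--         if len(a) == m:
--             b.append(a)
--             a = []
--     for i in b:
--         if min(i) <= k:
--             answer += min(i) * m
--         else:
--             answer += k * m
--
--     return answer
-- ===== SOURCE B (Python) =====
-- def solution(k, m, score):
--     # Sort once (descending); each full group's minimum is simply every m-th
--     # element (indices m-1, 2m-1, ...), so no group lists or min() scans are built.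
--     # Unlike A, this does not mutate `score` in place.
--     s = sorted(score, reverse=True)
--     if m <= 0:
--         return 0
--     total = 0
--     n = len(s)
--     i = m - 1
--     while i < n:
--         total += min(s[i], k) * m
--         i += m
--     return total
-- ===== Notes on version B (the rewrite author's own statement) =====
-- stated objective: simpler
-- what changed: B drops A's chunk-list construction and per-group min() scans: after one descending sort it reads each full group's minimum directly at indices m-1, 2m-1, ... and accumulates min(s[i],k)*m in a single index loop (B also does not mutate score in place).
import Mathlib
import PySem

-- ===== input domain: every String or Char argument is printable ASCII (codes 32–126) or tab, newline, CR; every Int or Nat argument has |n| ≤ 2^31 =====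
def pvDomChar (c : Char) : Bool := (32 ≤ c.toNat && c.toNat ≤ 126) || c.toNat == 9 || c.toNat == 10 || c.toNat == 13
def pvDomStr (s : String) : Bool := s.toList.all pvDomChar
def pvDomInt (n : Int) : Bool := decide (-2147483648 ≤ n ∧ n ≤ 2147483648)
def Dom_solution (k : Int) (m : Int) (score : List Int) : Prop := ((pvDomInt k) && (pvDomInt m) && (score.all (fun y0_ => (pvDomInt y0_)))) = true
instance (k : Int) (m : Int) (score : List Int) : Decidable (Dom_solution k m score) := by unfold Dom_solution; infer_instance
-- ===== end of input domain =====

-- B replaces A's explicit m-sized group lists and min() scans by reading group minima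
-- directly at indices m-1, 2m-1, … of the descending sort (return value only: A sorts
-- `score` in place, B does not mutate it).

-- ===== PORT A =====
-- one step of A's group-building loop: append i to a, close the group when len(a) == m
def stepA (m : Int) (st : List Int × List (List Int)) (i : Int) : List Int × List (List Int) :=
  let a := st.1 ++ [i]
  if (a.length : Int) = m then (([] : List Int), st.2 ++ [a]) else (a, st.2)

-- one step of A's summing loop over the groups b
def addGroup (k : Int) (m : Int) (answer : Int) (g : List Int) : Int :=
  let mn := (PySem.List.min? g (fun x => x)).getD 0   -- min(g); g is always nonempty in A
  if mn ≤ k then answer + mn * m else answer + k * m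

def solution (k : Int) (m : Int) (score : List Int) : Int :=
  (((PySem.List.sorted score (fun x => x) true).foldl (stepA m)
      (([] : List Int), ([] : List (List Int)))).2).foldl (addGroup k m) 0

-- ===== PORT B =====
-- B's while loop: i runs over m-1, 2m-1, …; needs 0 < m for termination
def loopB (k : Int) (m : Int) (s : List Int) (hm : 0 < m) (total : Int) (i : Int) : Int :=
  if h : i < (s.length : Int) then
    loopB k m s hm (total + min ((PySem.List.pyGet? s i).getD 0) k * m) (i + m)
  else total
termination_by ((s.length : Int) - i).toNat
decreasing_by omega

def solution_alt (k : Int) (m : Int) (score : List Int) : Int :=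
  if h : m ≤ 0 then 0
  else loopB k m (PySem.List.sorted score (fun x => x) true) (by omega) 0 (m - 1)

-- ===== PRECONDITION & SPEC =====
def Spec_solution (k : Int) (m : Int) (score : List Int) (out : Int) : Prop := out = solution_alt k m score
instance (k : Int) (m : Int) (score : List Int) (out : Int) : Decidable (Spec_solution k m score out) := by unfold Spec_solution; infer_instance

-- ===== CLAIM (what is proved, stated in full; the proofs are below) =====
def Claim_equal_solution : Prop := ∀ (k : Int) (m : Int) (score : List Int), Dom_solution k m score → Spec_solution k m score (solution k m score)

-- ===== LEMMAS AND PROOFS =====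

-- common characterisation: sum over full groups of a (descending) list, via take/drop
def chunkSum (k m : Int) (s : List Int) : Int :=
  if h : 0 < m ∧ m.toNat ≤ s.length then
    min (s.getD (m.toNat - 1) 0) k * m + chunkSum k m (s.drop m.toNat)
  else 0
termination_by s.length
decreasing_by simp [List.length_drop]; omega

def chunksOf (mn : Nat) (s : List Int) : List (List Int) :=
  if h : 0 < mn ∧ mn ≤ s.length then s.take mn :: chunksOf mn (s.drop mn) else []
termination_by s.length
decreasing_by simp [List.length_drop]; omega

theorem loopB_eq (k m : Int) (hm : 0 < m) (s : List Int) (total i : Int) (hi : m - 1 ≤ i) :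
    loopB k m s hm total i = total + chunkSum k m (s.drop (i + 1 - m).toNat) := by
  rw [loopB]
  split
  · rename_i h
    rw [loopB_eq k m hm s _ (i + m) (by omega)]
    have hd : (i + m + 1 - m) = i + 1 := by ring
    rw [hd]
    conv_rhs => rw [chunkSum]
    rw [dif_pos (by refine ⟨hm, ?_⟩; simp; omega)]
    have h1 : ((i + 1 - m).toNat + (m.toNat - 1)) = i.toNat := by omega
    have h2 : ((i + 1 - m).toNat + m.toNat) = (i + 1).toNat := by omega
    have hg : (s.drop (i + 1 - m).toNat).getD (m.toNat - 1) 0 = s.getD i.toNat 0 := by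
      simp [List.getD_eq_getElem?_getD, List.getElem?_drop, h1]
    have hp : (PySem.List.pyGet? s i).getD 0 = s.getD i.toNat 0 := by
      rw [PySem.List.pyGet?_of_nonneg s (by omega)]
      simp [List.getD_eq_getElem?_getD]
    rw [List.drop_drop, h2, hg, hp]
    ring
  · rename_i h
    rw [chunkSum]
    rw [dif_neg (by simp; intro _; omega)]
    omega
termination_by ((s.length : Int) - i).toNat
decreasing_by omega

-- A's first loop builds exactly the m-chunks
theorem buildChunks (m : Int) (hm : 0 < m) :
    ∀ (s a : List Int) (b : List (List Int)), a.length < m.toNat →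
      (s.foldl (stepA m) (a, b)).2 = b ++ chunksOf m.toNat (a ++ s) := by
  intro s
  induction s with
  | nil =>
    intro a b ha
    rw [chunksOf, dif_neg (by simp; intro _; omega)]
    simp
  | cons i s ih =>
    intro a b ha
    simp only [List.foldl_cons]
    by_cases hc : ((a ++ [i]).length : Int) = m
    · have hc' : ((a.length : Int) + 1) = m := by simpa using hc
      rw [show stepA m (a, b) i = (([] : List Int), b ++ [a ++ [i]]) from by
        simp [stepA, hc']]
      rw [ih [] (b ++ [a ++ [i]]) (by simp; omega)]
      have hlen : (a ++ [i]).length = m.toNat := by simp at hc ⊢; omega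
      simp only [List.nil_append]
      rw [show a ++ i :: s = (a ++ [i]) ++ s from by simp]
      conv_rhs => rw [chunksOf]
      rw [dif_pos (by refine ⟨by omega, ?_⟩; rw [List.length_append, hlen]; omega)]
      rw [List.take_left' hlen, List.drop_left' hlen]
      simp
    · have hc' : ¬ (((a.length : Int) + 1) = m) := by simpa using hc
      rw [show stepA m (a, b) i = (a ++ [i], b) from by simp [stepA, hc']]
      rw [ih (a ++ [i]) b (by simp at hc ⊢; omega)]
      simp

theorem addGroup_shift (k m : Int) : ∀ (l : List (List Int)) (ans : Int),
    l.foldl (addGroup k m) ans = ans + l.foldl (addGroup k m) 0 := by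
  intro l
  induction l with
  | nil => simp
  | cons c l ih =>
    intro ans
    simp only [List.foldl_cons]
    rw [ih (addGroup k m ans c), ih (addGroup k m 0 c)]
    simp only [addGroup]
    split <;> ring

theorem foldl_min_last : ∀ (t : List Int) (x : Int), (x :: t).Pairwise (· ≥ ·) →
    t.foldl min x = (x :: t).getLast (List.cons_ne_nil x t) := by
  intro t
  induction t with
  | nil => intro x _; simp
  | cons y t ih =>
    intro x hp
    have hxy : y ≤ x := (List.pairwise_cons.1 hp).1 y (by simp)
    have hp' : (y :: t).Pairwise (· ≥ ·) := (List.pairwise_cons.1 hp).2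
    simp only [List.foldl_cons]
    rw [min_eq_right hxy, ih y hp']
    simp [List.getLast_cons]

theorem minval_sorted (c : List Int) (hne : c ≠ []) (hp : c.Pairwise (· ≥ ·)) :
    (PySem.List.min? c (fun x => x)).getD 0 = c.getLast hne := by
  cases c with
  | nil => exact absurd rfl hne
  | cons x t =>
    rw [PySem.List.min?_id_cons]
    simpa using foldl_min_last t x hp

theorem foldChunks (k m : Int) (hm : 0 < m) :
    ∀ (t : List Int), t.Pairwise (· ≥ ·) →
      (chunksOf m.toNat t).foldl (addGroup k m) 0 = chunkSum k m t := by
  intro t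
  induction ht : t.length using Nat.strong_induction_on generalizing t with
  | _ n ih =>
    intro hp
    rw [chunksOf, chunkSum]
    by_cases h : 0 < m.toNat ∧ m.toNat ≤ t.length
    · rw [dif_pos h, dif_pos ⟨hm, h.2⟩]
      simp only [List.foldl_cons]
      rw [addGroup_shift]
      have hdlen : (t.drop m.toNat).length < n := by rw [List.length_drop]; omega
      rw [ih _ hdlen _ rfl (hp.sublist (List.drop_sublist _ _))]
      have hclen : (t.take m.toNat).length = m.toNat := by
        rw [List.length_take]; omega
      have htake : t.take m.toNat ≠ [] := by
        intro hc
        rw [hc] at hclen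
        simp at hclen
        omega
      have hptake : (t.take m.toNat).Pairwise (· ≥ ·) :=
        hp.sublist (List.take_sublist _ _)
      have hmin : (PySem.List.min? (t.take m.toNat) (fun x => x)).getD 0
          = t.getD (m.toNat - 1) 0 := by
        rw [minval_sorted _ htake hptake, List.getLast_eq_getElem]
        simp only [hclen]
        rw [List.getElem_take]
        rw [List.getD_eq_getElem?_getD,
          List.getElem?_eq_getElem (show m.toNat - 1 < t.length by omega)]
        rfl
      simp only [addGroup, hmin]
      split
      · rename_i hle
        rw [min_eq_left hle]
        ring
      · rename_i hle
        rw [min_eq_right ((not_le.mp hle).le)]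
        ring
    · rw [dif_neg h, dif_neg (by intro hc; exact h ⟨by omega, hc.2⟩)]
      simp

theorem solution_m_nonpos (k m : Int) (hm : m ≤ 0) :
    ∀ (s a : List Int) (b : List (List Int)), (s.foldl (stepA m) (a, b)).2 = b := by
  intro s
  induction s with
  | nil => intro a b; rfl
  | cons i s ih =>
    intro a b
    simp only [List.foldl_cons]
    rw [show stepA m (a, b) i = (a ++ [i], b) from by
      simp only [stepA]; rw [if_neg (by simp; omega)]]
    exact ih (a ++ [i]) b

-- ===== VERDICT (by name: the statement is the Claim_ definition above) =====
theorem solution_spec : Claim_equal_solution := by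
  intro k m score _
  unfold Spec_solution solution solution_alt
  by_cases hm : m ≤ 0
  · rw [solution_m_nonpos k m hm]
    simp [hm]
  · have hm' : 0 < m := by omega
    rw [dif_neg hm]
    rw [buildChunks m hm' _ [] [] (by simp only [List.length_nil]; omega)]
    simp only [List.nil_append]
    rw [foldChunks k m hm' _ (by
      have := PySem.List.sorted_pairwise_rev score (fun x => x)
      simpa using this)]
    rw [loopB_eq k m hm' _ 0 (m - 1) (by omega)]
    have : (m - 1 + 1 - m) = (0 : Int) := by ring
    rw [this]
    simp
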